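-- pv_equiv track=rewrite | github.com/JustZer/will-be-famous | reverse_work/qcc_work/qcc_search_spider.py | _combine_financial_data
-- ===== SOURCE A (Python) =====
-- def _combine_financial_data(financial_data):
--     """
--     将不同财务信息按年度合并为一个字典。
--
--     Args:
--         financial_data (dict): 包含多个财务类别信息的字典。
--
--     Returns:
--         dict: 按年度组合的财务信息字典。
--     """
--     combined_data = {}
--     for category, years_data in financial_data.items():
--         for year, data in years_data.items():
--             if year not in combined_data:
--                 combined_data[year] = {}
--             combined_data[year].update({category: data})
--     return combined_data
-- ===== SOURCE B (Python) =====
-- def _combine_financial_data(financial_data):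
--     """Transpose category->year->data into year->category->data by first
--     collecting the distinct years, then re-scanning the categories per year."""
--     years = list(dict.fromkeys(
--         y for cat_data in financial_data.values() for y in cat_data))
--     return {
--         year: {c: cd[year] for c, cd in financial_data.items() if year in cd}
--         for year in years
--     }
-- ===== Notes on version B (the rewrite author's own statement) =====
-- stated objective: alternative
-- what changed: Instead of A's incremental transpose (one pass inserting each (category,year) pair into a growing nested dict), B first collects the distinct years and then builds the result with the loop nesting reversed: for each collected year it re-scans all categories and keeps those containing the year, trading a factor of |years| in the scan for the simpler two-phase decomposition.
import Mathlib
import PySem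

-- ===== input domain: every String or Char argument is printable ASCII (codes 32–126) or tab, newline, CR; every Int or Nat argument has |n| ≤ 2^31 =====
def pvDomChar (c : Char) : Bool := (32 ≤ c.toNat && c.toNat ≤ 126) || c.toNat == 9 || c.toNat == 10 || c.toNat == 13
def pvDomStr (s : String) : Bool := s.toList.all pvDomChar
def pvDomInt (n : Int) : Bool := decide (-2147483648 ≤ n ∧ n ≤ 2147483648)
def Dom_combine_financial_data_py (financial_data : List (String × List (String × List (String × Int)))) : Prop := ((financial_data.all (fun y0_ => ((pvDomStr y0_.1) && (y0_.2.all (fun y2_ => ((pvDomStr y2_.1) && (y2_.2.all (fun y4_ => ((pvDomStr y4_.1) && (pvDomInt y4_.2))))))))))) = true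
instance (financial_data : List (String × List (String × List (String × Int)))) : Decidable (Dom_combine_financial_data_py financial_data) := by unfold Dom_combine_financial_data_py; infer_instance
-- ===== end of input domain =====

-- B replaces A's incremental transpose with a precomputed distinct-year list plus a
-- per-year re-scan of the categories (different decomposition, same cost class).


-- ===== PORT A =====
-- the body of A's inner loop: `if year not in combined: combined[year] = {}` followed by
-- `combined[year].update({category: data})` (in-place update of the existing key = overwrite-insert)
def pvStepA (category : String)
    (comb : PySem.Dict String (PySem.Dict String (List (String × Int))))
    (q : String × List (String × Int)) :
    PySem.Dict String (PySem.Dict String (List (String × Int))) :=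
  let comb := if comb.contains q.1 then comb else comb.insert q.1 PySem.Dict.empty
  comb.insert q.1 ((comb.getD q.1 PySem.Dict.empty).insert category q.2)

def combine_financial_data_py (financial_data : List (String × List (String × List (String × Int)))) : List (String × List (String × List (String × Int))) :=
  let combined := financial_data.foldl
    (fun comb p => p.2.foldl (pvStepA p.1) comb)
    (PySem.Dict.empty : PySem.Dict String (PySem.Dict String (List (String × Int))))
  combined.items.map (fun r => (r.1, r.2.items))

-- ===== PORT B =====
-- `list(dict.fromkeys(y for cat_data in financial_data.values() for y in cat_data))`
def pvYearsB (financial_data : List (String × List (String × List (String × Int)))) : List String :=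
  PySem.List.dedup (financial_data.flatMap (fun p => p.2.map Prod.fst))

-- `{c: cd[year] for c, cd in financial_data.items() if year in cd}` (exact under Pre_'s
-- distinct keys: each category occurs once, so the dict comprehension is this list)
def pvRowB (financial_data : List (String × List (String × List (String × Int)))) (year : String) : List (String × List (String × Int)) :=
  financial_data.filterMap (fun p => ((PySem.Dict.mk p.2).get? year).map (fun d => (p.1, d)))

def combine_financial_data_py_alt (financial_data : List (String × List (String × List (String × Int)))) : List (String × List (String × List (String × Int))) :=
  (pvYearsB financial_data).map (fun year => (year, pvRowB financial_data year))

-- ===== PRECONDITION & SPEC =====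
-- Pre_ requires distinct top-level keys and distinct year keys inside each category:
-- an association list with duplicate keys does not represent any Python dict, so such
-- inputs never reach the Python A (whose argument is a dict) at all.
def Pre_combine_financial_data_py (financial_data : List (String × List (String × List (String × Int)))) : Prop :=
  (financial_data.map Prod.fst).Nodup ∧ ∀ p ∈ financial_data, (p.2.map Prod.fst).Nodup

instance (financial_data : List (String × List (String × List (String × Int)))) : Decidable (Pre_combine_financial_data_py financial_data) := by unfold Pre_combine_financial_data_py; infer_instance

def pvWitness_combine_financial_data_py : (List (String × List (String × List (String × Int)))) :=
  [("revenue", [("2020", [("v", 1)]), ("2021", [("v", 2)])]),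
   ("cost", [("2020", [("v", 3)])])]

def Spec_combine_financial_data_py (financial_data : List (String × List (String × List (String × Int)))) (out : List (String × List (String × List (String × Int)))) : Prop := out = combine_financial_data_py_alt financial_data
instance (financial_data : List (String × List (String × List (String × Int)))) (out : List (String × List (String × List (String × Int)))) : Decidable (Spec_combine_financial_data_py financial_data out) := by unfold Spec_combine_financial_data_py; infer_instance

-- ===== CLAIM (what is proved, stated in full; the proofs are below) =====
def Claim_equal_combine_financial_data_py : Prop := ∀ (financial_data : List (String × List (String × List (String × Int)))), Dom_combine_financial_data_py financial_data → Pre_combine_financial_data_py financial_data → Spec_combine_financial_data_py financial_data (combine_financial_data_py financial_data)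

-- ===== LEMMAS AND PROOFS =====

-- the nested-dict state A has built after processing a prefix Q of the input:
-- it is exactly B's answer for that prefix, wrapped back into dicts
def pvState (Q : List (String × List (String × List (String × Int)))) : PySem.Dict String (PySem.Dict String (List (String × Int))) :=
  PySem.Dict.mk ((pvYearsB Q).map (fun y => (y, PySem.Dict.mk (pvRowB Q y))))

theorem pv_get?_mk_append {ν : Type} (l₁ l₂ : List (String × ν)) (z : String) :
    (PySem.Dict.mk (l₁ ++ l₂)).get? z = ((PySem.Dict.mk l₁).get? z).or ((PySem.Dict.mk l₂).get? z) := by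
  induction l₁ with
  | nil => simp [PySem.Dict.get?]
  | cons h t ih =>
    rw [List.cons_append, PySem.Dict.get?_mk_cons, PySem.Dict.get?_mk_cons]
    split <;> simp [ih]

theorem pv_none_of_not_mem {ν : Type} (l : List (String × ν)) (z : String) (h : z ∉ l.map Prod.fst) :
    (PySem.Dict.mk l).get? z = none := by
  rw [PySem.Dict.get?_eq_none_iff_not_mem_keys]
  simpa [PySem.Dict.keys_mk] using h

theorem pv_dedup_append_singleton (L : List String) (y : String) :
    PySem.List.dedup (L ++ [y]) = if y ∈ L then PySem.List.dedup L else PySem.List.dedup L ++ [y] := by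
  simp [PySem.List.dedup_eq_ofList, PySem.Set.ofList_append, PySem.Set.update_cons, PySem.Set.update_nil, PySem.Set.add, PySem.Set.contains]

theorem pvRowB_append (Q : List (String × List (String × List (String × Int)))) (c : String)
    (cd : List (String × List (String × Int))) (z : String) :
    pvRowB (Q ++ [(c, cd)]) z = pvRowB Q z ++ (((PySem.Dict.mk cd).get? z).map (fun d => (c, d))).toList := by
  cases hg : (PySem.Dict.mk cd).get? z <;> simp [pvRowB, List.filterMap_append, hg]

theorem pvYearsB_append (Q : List (String × List (String × List (String × Int)))) (c : String)
    (cd : List (String × List (String × Int))) :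
    pvYearsB (Q ++ [(c, cd)]) = PySem.List.dedup (Q.flatMap (fun p => p.2.map Prod.fst) ++ cd.map Prod.fst) := by
  simp [pvYearsB]

theorem pvRowB_keys_sub (Q : List (String × List (String × List (String × Int)))) (y : String)
    {c d} (h : (c, d) ∈ pvRowB Q y) : c ∈ Q.map Prod.fst := by
  simp only [pvRowB, List.mem_filterMap] at h
  obtain ⟨p, hp, hg⟩ := h
  rw [Option.map_eq_some_iff] at hg
  obtain ⟨w, _, heq⟩ := hg
  exact List.mem_map.2 ⟨p, hp, congrArg Prod.fst heq⟩

theorem pvRowB_eq_nil_of_not_mem (Q : List (String × List (String × List (String × Int)))) (y : String)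
    (h : y ∉ Q.flatMap (fun p => p.2.map Prod.fst)) : pvRowB Q y = [] := by
  rw [pvRowB, List.filterMap_eq_nil_iff]
  intro p hp
  rw [pv_none_of_not_mem]
  · simp
  · exact fun hy => h (List.mem_flatMap.2 ⟨p, hp, hy⟩)

-- one inner-loop step of A, started on the state for Q ++ [(c, cdp)], extends that
-- state to the one for Q ++ [(c, cdp ++ [(y, d)])]
theorem pvStepA_state (Q : List (String × List (String × List (String × Int)))) (c : String)
    (cdp : List (String × List (String × Int))) (y : String) (d : List (String × Int))
    (hc : c ∉ Q.map Prod.fst) (hy : y ∉ cdp.map Prod.fst) :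
    pvStepA c (pvState (Q ++ [(c, cdp)])) (y, d) = pvState (Q ++ [(c, cdp ++ [(y, d)])]) := by
  set Q' := Q ++ [(c, cdp)] with hQ'
  set Y := pvYearsB Q' with hY
  have hflat : Q'.flatMap (fun p => p.2.map Prod.fst) = Q.flatMap (fun p => p.2.map Prod.fst) ++ cdp.map Prod.fst := by
    simp [hQ']
  have hYnodup : Y.Nodup := PySem.List.nodup_dedup _
  have hkeys : (pvState Q').keys = Y := by
    simp [pvState, PySem.Dict.keys_mk, Function.comp_def]
    rfl
  have hcont : (pvState Q').contains y = decide (y ∈ Y) := by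
    rw [PySem.Dict.contains_eq_decide_mem_keys, hkeys]
  have hrowy : pvRowB Q' y = pvRowB Q y := by
    rw [hQ', pvRowB_append, pv_none_of_not_mem _ _ hy]; simp
  have hcrow : (PySem.Dict.mk (pvRowB Q y)).contains c = false := by
    rw [PySem.Dict.contains_eq_decide_mem_keys]
    simp only [PySem.Dict.keys_mk, decide_eq_false_iff_not]
    intro hmem
    obtain ⟨⟨c', d'⟩, hm, hfst⟩ := List.mem_map.1 hmem
    subst hfst
    exact hc (pvRowB_keys_sub Q y hm)
  have hY'' : pvYearsB (Q ++ [(c, cdp ++ [(y, d)])]) = if y ∈ Y then Y else Y ++ [y] := by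
    rw [pvYearsB_append]
    have h1 : Q.flatMap (fun p => p.2.map Prod.fst) ++ (cdp ++ [(y, d)]).map Prod.fst
        = (Q'.flatMap (fun p => p.2.map Prod.fst)) ++ [y] := by
      simp [hflat]
    rw [h1, pv_dedup_append_singleton]
    have hmem : (y ∈ Q'.flatMap fun p => p.2.map Prod.fst) ↔ y ∈ Y := (PySem.List.mem_dedup _ _).symm
    by_cases hcase : y ∈ Y
    · rw [if_pos (hmem.2 hcase), if_pos hcase]; rfl
    · rw [if_neg (fun h => hcase (hmem.1 h)), if_neg hcase]; rfl
  have hrow'' : ∀ z, pvRowB (Q ++ [(c, cdp ++ [(y, d)])]) z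
      = if z = y then pvRowB Q y ++ [(c, d)] else pvRowB Q' z := by
    intro z
    rw [pvRowB_append]
    have hsplit : (PySem.Dict.mk (cdp ++ [(y, d)])).get? z
        = ((PySem.Dict.mk cdp).get? z).or (if y == z then some d else none) := by
      rw [pv_get?_mk_append]
      congr 1
      rw [PySem.Dict.get?_mk_cons]
      split <;> simp [PySem.Dict.get?]
    by_cases hz : z = y
    · subst hz
      rw [if_pos rfl, hsplit, pv_none_of_not_mem _ _ hy]
      simp
    · rw [if_neg hz, hsplit]
      have h0 : (if y == z then some d else none) = (none : Option (List (String × Int))) := by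
        simp only [beq_iff_eq, ite_eq_right_iff]
        exact fun h => absurd h.symm hz
      rw [h0, Option.or_none, hQ', pvRowB_append Q c cdp z]
  by_cases hYmem : y ∈ Y
  · have hcont' : (pvState Q').contains y = true := by rw [hcont]; simpa
    have hgetD : (pvState Q').getD y PySem.Dict.empty = PySem.Dict.mk (pvRowB Q' y) := by
      apply PySem.Dict.getD_of_mem_items
      · exact List.mem_map.2 ⟨y, hYmem, rfl⟩
      · rw [hkeys]; exact hYnodup
    have hinner : (PySem.Dict.mk (pvRowB Q' y)).insert c d = PySem.Dict.mk (pvRowB Q y ++ [(c, d)]) := by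
      apply PySem.Dict.ext
      rw [hrowy, PySem.Dict.items_insert_of_not_contains _ _ hcrow]
    simp only [pvStepA, hcont', if_true, hgetD, hinner]
    apply PySem.Dict.ext
    rw [PySem.Dict.items_insert_of_contains _ _ hcont']
    show ((pvYearsB Q').map _).map _ = _
    rw [List.map_map]
    conv_rhs => rw [pvState, hY'', if_pos hYmem]
    show _ = Y.map _
    rw [← hY]
    apply List.map_congr_left
    intro z hz
    by_cases hzy : z = y
    · subst hzy
      simp [hrow'' z]
    · have hb : (z == y) = false := by simp [hzy]
      simp [hrow'' z, hzy]
  · have hcont' : (pvState Q').contains y = false := by rw [hcont]; simpa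
    have hynotflatQ : y ∉ Q.flatMap (fun p => p.2.map Prod.fst) := by
      intro hmem
      apply hYmem
      rw [hY, pvYearsB, PySem.List.mem_dedup, hflat]
      exact List.mem_append.2 (Or.inl hmem)
    have hrowQy : pvRowB Q y = [] := pvRowB_eq_nil_of_not_mem Q y hynotflatQ
    have hcomb1 : (pvState Q').insert y PySem.Dict.empty
        = PySem.Dict.mk ((Y.map (fun z => (z, PySem.Dict.mk (pvRowB Q' z)))) ++ [(y, PySem.Dict.empty)]) := by
      apply PySem.Dict.ext
      rw [PySem.Dict.items_insert_of_not_contains _ _ hcont']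
      rfl
    have hget1 : ((pvState Q').insert y PySem.Dict.empty).get? y = some PySem.Dict.empty := by
      rw [hcomb1, pv_get?_mk_append, pv_none_of_not_mem]
      · simp [PySem.Dict.get?]
      · simpa [Function.comp_def] using hYmem
    have hgetD1 : ((pvState Q').insert y PySem.Dict.empty).getD y PySem.Dict.empty = PySem.Dict.empty := by
      rw [PySem.Dict.getD_eq_get?_getD, hget1]
      rfl
    have hinner : (PySem.Dict.empty : PySem.Dict String (List (String × Int))).insert c d = PySem.Dict.mk [(c, d)] := by
      apply PySem.Dict.ext
      rw [PySem.Dict.items_insert_of_not_contains _ _ (PySem.Dict.contains_empty _)]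
      rfl
    have hcont1 : ((pvState Q').insert y PySem.Dict.empty).contains y = true :=
      PySem.Dict.contains_insert_self _ _ _
    simp only [pvStepA, hcont', Bool.false_eq_true, if_false, hgetD1, hinner]
    apply PySem.Dict.ext
    rw [PySem.Dict.items_insert_of_contains _ _ hcont1, hcomb1]
    show ((Y.map _) ++ [(y, PySem.Dict.empty)]).map _ = _
    rw [List.map_append, List.map_map]
    conv_rhs => rw [pvState, hY'', if_neg hYmem]
    rw [List.map_append]
    congr 1
    · apply List.map_congr_left
      intro z hz
      have hzy : z ≠ y := fun h => hYmem (h ▸ hz)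
      have hb : (z == y) = false := by simp [hzy]
      simp [hrow'' z, hzy]
    · simp [hrow'' y, hrowQy]

theorem pvState_nil_cat (Q : List (String × List (String × List (String × Int)))) (c : String) :
    pvState (Q ++ [(c, [])]) = pvState Q := by
  apply PySem.Dict.ext
  show ((pvYearsB (Q ++ [(c, [])])).map _) = _
  have h1 : pvYearsB (Q ++ [(c, [])]) = pvYearsB Q := by simp [pvYearsB]
  rw [h1]
  apply List.map_congr_left
  intro z _
  rw [pvRowB_append]
  simp [PySem.Dict.get?]

theorem pv_inner_fold (Q : List (String × List (String × List (String × Int)))) (c : String)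
    (hc : c ∉ Q.map Prod.fst) :
    ∀ cd2 cd1, ((cd1 ++ cd2).map (Prod.fst : String × List (String × Int) → String)).Nodup →
      cd2.foldl (pvStepA c) (pvState (Q ++ [(c, cd1)])) = pvState (Q ++ [(c, cd1 ++ cd2)]) := by
  intro cd2
  induction cd2 with
  | nil => intro cd1 _; simp
  | cons q t ih =>
    intro cd1 hnd
    rw [List.foldl_cons]
    have hy : q.1 ∉ cd1.map Prod.fst := by
      rw [List.map_append] at hnd
      intro hmem
      exact (List.disjoint_of_nodup_append hnd) hmem (by simp)
    have hstep : pvStepA c (pvState (Q ++ [(c, cd1)])) q = pvState (Q ++ [(c, cd1 ++ [q])]) := by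
      obtain ⟨y, d⟩ := q
      exact pvStepA_state Q c cd1 y d hc hy
    rw [hstep, ih (cd1 ++ [q]) (by simpa using hnd)]
    simp

theorem pv_outer_fold :
    ∀ (rest Q : List (String × List (String × List (String × Int)))),
      ((Q ++ rest).map Prod.fst).Nodup →
      (∀ p ∈ rest, (p.2.map Prod.fst).Nodup) →
      rest.foldl (fun comb p => p.2.foldl (pvStepA p.1) comb) (pvState Q) = pvState (Q ++ rest) := by
  intro rest
  induction rest with
  | nil => intro Q _ _; simp
  | cons p t ih =>
    intro Q hnd hin
    rw [List.foldl_cons]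
    have hc : p.1 ∉ Q.map Prod.fst := by
      rw [List.map_append] at hnd
      intro hmem
      exact (List.disjoint_of_nodup_append hnd) hmem (by simp)
    have h0 : pvState Q = pvState (Q ++ [(p.1, [])]) := (pvState_nil_cat Q p.1).symm
    have hfold : p.2.foldl (pvStepA p.1) (pvState Q) = pvState (Q ++ [p]) := by
      rw [h0]
      have := pv_inner_fold Q p.1 hc p.2 [] (by simpa using hin p (by simp))
      simpa using this
    rw [hfold, ih (Q ++ [p]) (by simpa using hnd) (fun q hq => hin q (by simp [hq]))]
    simp

theorem pv_final (fd : List (String × List (String × List (String × Int))))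
    (h1 : (fd.map Prod.fst).Nodup) (h2 : ∀ p ∈ fd, (p.2.map Prod.fst).Nodup) :
    combine_financial_data_py fd = combine_financial_data_py_alt fd := by
  have hempty : (PySem.Dict.empty : PySem.Dict String (PySem.Dict String (List (String × Int)))) = pvState [] := by
    apply PySem.Dict.ext
    rfl
  unfold combine_financial_data_py
  rw [hempty, pv_outer_fold fd [] (by simpa using h1) h2]
  show ((pvYearsB _).map _).map _ = _
  simp only [List.nil_append, List.map_map]
  rfl

-- ===== VERDICT (by name: the statement is the Claim_ definition above) =====
theorem combine_financial_data_py_spec : Claim_equal_combine_financial_data_py := by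
  intro fd _ hpre
  unfold Spec_combine_financial_data_py
  exact pv_final fd hpre.1 hpre.2
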